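-- pv_equiv track=rewrite | github.com/YifanMo/Address2IP_research | dns_monitor.py | domain_matches
-- ===== SOURCE A (Python) =====
-- def domain_matches(domain: str, patterns: list[str]) -> bool:
--     if not patterns:
--         return True
--     domain = domain.rstrip(".").lower()
--     for pattern in patterns:
--         needle = pattern.rstrip(".").lower()
--         if domain == needle or domain.endswith("." + needle):
--             return True
--     return False
-- ===== SOURCE B (Python) =====
-- def domain_matches(domain: str, patterns: list[str]) -> bool:
--     if not patterns:
--         return True
--     d = domain.rstrip(".").lower()
--     pats = {p.rstrip(".").lower() for p in patterns}
--     if d in pats: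
--         return True
--     for i, ch in enumerate(d):
--         if ch == "." and d[i + 1:] in pats:
--             return True
--     return False
-- ===== Notes on version B (the rewrite author's own statement) =====
-- stated objective: alternative
-- what changed: B inverts the traversal: it normalizes the patterns once into a set and walks the domain's label-aligned suffixes (the whole domain plus the tail after each dot), testing set membership, instead of scanning the pattern list with endswith per pattern.
import Mathlib
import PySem

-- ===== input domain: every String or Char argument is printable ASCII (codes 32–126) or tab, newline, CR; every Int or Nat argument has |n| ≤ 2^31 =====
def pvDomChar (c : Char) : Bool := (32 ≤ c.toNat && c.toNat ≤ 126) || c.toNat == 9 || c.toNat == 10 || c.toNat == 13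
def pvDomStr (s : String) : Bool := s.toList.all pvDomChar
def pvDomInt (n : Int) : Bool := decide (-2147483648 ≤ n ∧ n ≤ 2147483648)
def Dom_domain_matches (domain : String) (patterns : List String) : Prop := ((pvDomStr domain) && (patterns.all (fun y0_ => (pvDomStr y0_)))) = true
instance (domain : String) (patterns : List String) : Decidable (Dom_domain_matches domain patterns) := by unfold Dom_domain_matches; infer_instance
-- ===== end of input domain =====

-- B replaces A's per-pattern endswith scan by a prebuilt set of normalized patterns
-- probed with the domain's label-aligned suffixes (objective: alternative, same cost class).

-- shared normalization s.rstrip(".").lower(); rstrip(".") is ported by hand as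
-- reverse / dropWhile (== '.') / reverse, exact: it removes exactly the trailing '.' characters
def pvNorm (s : String) : List Char :=
  PySem.Chars.lower ((s.toList.reverse.dropWhile (fun c => c == '.')).reverse)

-- ===== PORT A =====
-- the 'for pattern in patterns' loop with its early return
def pvLoopA (d : List Char) : List String → Bool
  | [] => false
  | p :: rest =>
      let needle := pvNorm p
      if d == needle || PySem.Chars.endswith d ('.' :: needle) then true
      else pvLoopA d rest

def domain_matches (domain : String) (patterns : List String) : Bool :=
  if patterns.isEmpty then true
  else pvLoopA (pvNorm domain) patterns

-- ===== PORT B =====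
-- Source B's 'for i, ch in enumerate(d)' loop: structural walk of d; at a char c followed
-- by rest, Python's d[i+1:] is exactly rest
def pvLoopB (pats : PySem.Set (List Char)) : List Char → Bool
  | [] => false
  | c :: rest =>
      if c == '.' && PySem.Set.contains pats rest then true
      else pvLoopB pats rest

def domain_matches_alt (domain : String) (patterns : List String) : Bool :=
  if patterns.isEmpty then true
  else
    let d := pvNorm domain
    let pats := PySem.Set.ofList (patterns.map pvNorm)
    if PySem.Set.contains pats d then true
    else pvLoopB pats d

-- ===== PRECONDITION & SPEC =====
def Spec_domain_matches (domain : String) (patterns : List String) (out : Bool) : Prop := out = domain_matches_alt domain patterns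
instance (domain : String) (patterns : List String) (out : Bool) : Decidable (Spec_domain_matches domain patterns out) := by unfold Spec_domain_matches; infer_instance

-- ===== CLAIM (what is proved, stated in full; the proofs are below) =====
def Claim_equal_domain_matches : Prop := ∀ (domain : String) (patterns : List String), Dom_domain_matches domain patterns → Spec_domain_matches domain patterns (domain_matches domain patterns)

-- ===== LEMMAS AND PROOFS =====

theorem pvLoopA_iff (d : List Char) (ps : List String) :
    pvLoopA d ps = true ↔ ∃ p ∈ ps, d = pvNorm p ∨ ('.' :: pvNorm p) <:+ d := by
  induction ps with
  | nil => simp [pvLoopA]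
  | cons p rest ih =>
      simp only [pvLoopA]
      by_cases h : d = pvNorm p ∨ ('.' :: pvNorm p) <:+ d
      · rw [if_pos (by simpa [PySem.Chars.endswith_iff] using h)]
        simp only [true_iff]
        exact ⟨p, List.mem_cons_self, h⟩
      · rw [if_neg (by simpa [PySem.Chars.endswith_iff] using h), ih]
        constructor
        · rintro ⟨q, hq, hd⟩; exact ⟨q, List.mem_cons_of_mem _ hq, hd⟩
        · rintro ⟨q, hq, hd⟩
          rcases List.mem_cons.mp hq with rfl | hq
          · exact absurd hd h
          · exact ⟨q, hq, hd⟩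

theorem pvLoopB_iff (pats : PySem.Set (List Char)) (cs : List Char) :
    pvLoopB pats cs = true ↔ ∃ n ∈ pats, ('.' :: n) <:+ cs := by
  induction cs with
  | nil => simp [pvLoopB]
  | cons c rest ih =>
      simp only [pvLoopB]
      by_cases h : c = '.' ∧ rest ∈ pats
      · rw [if_pos (by simpa [PySem.Set.contains_iff] using h)]
        simp only [true_iff]
        exact ⟨rest, h.2, by rw [h.1]⟩
      · rw [if_neg (by simpa [PySem.Set.contains_iff] using h), ih]
        constructor
        · rintro ⟨n, hn, hs⟩; exact ⟨n, hn, hs.trans (List.suffix_cons _ _)⟩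
        · rintro ⟨n, hn, hs⟩
          rcases List.suffix_cons_iff.mp hs with hs | hs
          · exfalso; apply h
            obtain ⟨hc, hr⟩ := List.cons.inj hs
            exact ⟨hc.symm, hr ▸ hn⟩
          · exact ⟨n, hn, hs⟩

-- ===== VERDICT (by name: the statement is the Claim_ definition above) =====
theorem domain_matches_spec : Claim_equal_domain_matches := by
  intro domain patterns _
  unfold Spec_domain_matches domain_matches domain_matches_alt
  by_cases hp : patterns.isEmpty = true
  · simp [hp]
  · rw [if_neg hp, if_neg hp]
    set d := pvNorm domain with hd
    set pats := PySem.Set.ofList (patterns.map pvNorm) with hpats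
    by_cases h1 : PySem.Set.contains pats d = true
    · -- some pattern normalizes to d itself
      rw [if_pos h1]
      rw [pvLoopA_iff]
      have : d ∈ patterns.map pvNorm := by
        have := (PySem.Set.contains_iff pats d).mp h1
        simpa [hpats, PySem.Set.mem_ofList] using this
      rcases List.mem_map.mp this with ⟨p, hpmem, hpeq⟩
      exact ⟨p, hpmem, Or.inl hpeq.symm⟩
    · rw [if_neg h1]
      rw [Bool.eq_iff_iff, pvLoopA_iff, pvLoopB_iff]
      constructor
      · rintro ⟨p, hpmem, hcase⟩
        rcases hcase with hcase | hcase
        · exfalso; apply h1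
          rw [PySem.Set.contains_iff, hpats, PySem.Set.mem_ofList]
          exact List.mem_map.mpr ⟨p, hpmem, hcase.symm⟩
        · exact ⟨pvNorm p, by rw [hpats, PySem.Set.mem_ofList]; exact List.mem_map.mpr ⟨p, hpmem, rfl⟩, hcase⟩
      · rintro ⟨n, hn, hs⟩
        have : n ∈ patterns.map pvNorm := by
          simpa [hpats, PySem.Set.mem_ofList] using hn
        rcases List.mem_map.mp this with ⟨p, hpmem, rfl⟩
        exact ⟨p, hpmem, Or.inr hs⟩
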